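-- pv_equiv track=rewrite | github.com/jshir700/config | scripts/common.py | get_clash_equivalent
-- ===== SOURCE A (Python) =====
-- LOON_TO_CLASH = {
--     "DEST-PORT": "DST-PORT",
--     "PROTOCOL": "NETWORK",
--     "final": "MATCH",
--     "URL-REGEX": "DOMAIN-REGEX",
-- }
--
-- def get_clash_equivalent(rule):
--     """Return the Clash equivalent line for a Loon-specific rule, or None.
--
--     Converts Loon-specific types (DEST-PORT, PROTOCOL, final) to Clash equivalents.
--     """
--     rule = rule.strip()
--     if rule == "final":
--         return "MATCH"
--     for loon_type, clash_type in LOON_TO_CLASH.items():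
--         if loon_type == "final":
--             continue
--         if rule.startswith(loon_type + ","):
--             return rule.replace(loon_type + ",", clash_type + ",", 1)
--     return None
-- ===== SOURCE B (Python) =====
-- _CLASH_PREFIX = {
--     "DEST-PORT": "DST-PORT",
--     "PROTOCOL": "NETWORK",
--     "URL-REGEX": "DOMAIN-REGEX",
-- }
--
-- def get_clash_equivalent(rule):
--     """Return the Clash equivalent line for a Loon-specific rule, or None."""
--     rule = rule.strip()
--     if rule == "final":
--         return "MATCH"
--     prefix, sep, rest = rule.partition(",")
--     if not sep:
--         return None
--     clash = _CLASH_PREFIX.get(prefix)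
--     if clash is None:
--         return None
--     return clash + "," + rest
-- ===== Notes on version B (the rewrite author's own statement) =====
-- stated objective: simpler
-- what changed: Replaces the per-key startswith scan (with its in-loop skip of the match-all key and count-limited replace) by one partition at the first comma plus a single dict lookup in a table without that key.
import Mathlib
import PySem

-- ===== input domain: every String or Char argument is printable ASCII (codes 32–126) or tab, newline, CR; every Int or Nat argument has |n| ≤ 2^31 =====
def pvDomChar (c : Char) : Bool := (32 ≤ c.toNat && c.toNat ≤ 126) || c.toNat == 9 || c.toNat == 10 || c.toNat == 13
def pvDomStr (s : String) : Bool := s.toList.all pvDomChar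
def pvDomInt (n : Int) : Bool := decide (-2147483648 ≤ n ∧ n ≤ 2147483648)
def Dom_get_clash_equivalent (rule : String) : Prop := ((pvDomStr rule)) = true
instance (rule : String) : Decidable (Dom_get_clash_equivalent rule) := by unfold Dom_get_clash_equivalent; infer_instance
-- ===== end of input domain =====

-- B replaces A's per-key startswith scan by one partition at the first comma plus a
-- single lookup in a table without the "final" key (objective: simpler).

-- ===== PORT A =====
-- LOON_TO_CLASH, as a list of (loon_type, clash_type) pairs in insertion order
def pvTableA : List (List Char × List Char) :=
  [("DEST-PORT".toList, "DST-PORT".toList),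
   ("PROTOCOL".toList, "NETWORK".toList),
   ("final".toList, "MATCH".toList),
   ("URL-REGEX".toList, "DOMAIN-REGEX".toList)]

-- hand port of `s.replace(old, new, 1)` (PySem has no count-limited replace):
-- replace the FIRST occurrence of old (found by Python's find) and nothing else; exact for old ≠ ''.
def pvReplace1 (s old new : List Char) : List Char :=
  let i := PySem.Chars.find s old
  if i < 0 then s else s.take i.toNat ++ new ++ s.drop (i.toNat + old.length)

-- the `for loon_type, clash_type in LOON_TO_CLASH.items():` loop
def pvLoopA (r : List Char) : List (List Char × List Char) → Option (List Char)
  | [] => none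
  | (lt, ct) :: rest =>
    if lt = "final".toList then pvLoopA r rest
    else if PySem.Chars.startswith r (lt ++ [',']) then
      some (pvReplace1 r (lt ++ [',']) (ct ++ [',']))
    else pvLoopA r rest

def get_clash_equivalent (rule : String) : Option String :=
  let r := PySem.Str.strip rule
  if r = "final" then some "MATCH"
  else (pvLoopA r.toList pvTableA).map String.ofList

-- ===== PORT B =====
-- dict without the "final" key, keyed by the part before the first comma
def pvTableB : List (List Char × List Char) :=
  [("DEST-PORT".toList, "DST-PORT".toList),
   ("PROTOCOL".toList, "NETWORK".toList),
   ("URL-REGEX".toList, "DOMAIN-REGEX".toList)]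

-- `rule.partition(",")`: none when there is no comma, else (part before, part after)
def pvSplitComma : List Char → Option (List Char × List Char)
  | [] => none
  | c :: cs =>
    if c = ',' then some ([], cs)
    else (pvSplitComma cs).map (fun pr => (c :: pr.1, pr.2))

def get_clash_equivalent_alt (rule : String) : Option String :=
  let r := PySem.Str.strip rule
  if r = "final" then some "MATCH"
  else
    match pvSplitComma r.toList with
    | none => none
    | some (p, rest) =>
      (List.lookup p pvTableB).map (fun ct => String.ofList (ct ++ ',' :: rest))

-- ===== PRECONDITION & SPEC =====
def Spec_get_clash_equivalent (rule : String) (out : Option String) : Prop := out = get_clash_equivalent_alt rule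
instance (rule : String) (out : Option String) : Decidable (Spec_get_clash_equivalent rule out) := by unfold Spec_get_clash_equivalent; infer_instance

-- ===== CLAIM (what is proved, stated in full; the proofs are below) =====
def Claim_equal_get_clash_equivalent : Prop := ∀ (rule : String), Dom_get_clash_equivalent rule → Spec_get_clash_equivalent rule (get_clash_equivalent rule)

-- ===== LEMMAS AND PROOFS =====

lemma pvSplitComma_none {cs : List Char} (h : pvSplitComma cs = none) : ',' ∉ cs := by
  induction cs with
  | nil => simp
  | cons c cs ih =>
    rw [pvSplitComma] at h
    by_cases hc : c = ','
    · rw [if_pos hc] at h; exact absurd h (by simp)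
    · rw [if_neg hc] at h
      have h' : pvSplitComma cs = none := by
        cases hcs : pvSplitComma cs with
        | none => rfl
        | some pr => rw [hcs] at h; simp at h
      intro hm
      rcases List.mem_cons.1 hm with he | hm
      · exact hc he.symm
      · exact ih h' hm

lemma pvSplitComma_some {cs p rest : List Char} (h : pvSplitComma cs = some (p, rest)) :
    cs = p ++ ',' :: rest ∧ ',' ∉ p := by
  induction cs generalizing p rest with
  | nil => exact absurd h (by simp [pvSplitComma])
  | cons c cs ih =>
    rw [pvSplitComma] at h
    by_cases hc : c = ','
    · rw [if_pos hc] at h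
      simp only [Option.some.injEq, Prod.mk.injEq] at h
      obtain ⟨hp, hr⟩ := h
      subst hp; subst hr; subst hc; simp
    · rw [if_neg hc] at h
      cases hcs : pvSplitComma cs with
      | none => rw [hcs] at h; simp at h
      | some pr =>
        obtain ⟨p1, p2⟩ := pr
        rw [hcs] at h
        simp only [Option.map_some, Option.some.injEq, Prod.mk.injEq] at h
        obtain ⟨hp, hr⟩ := h
        subst hp; subst hr
        obtain ⟨h1, h2⟩ := ih hcs
        refine ⟨by rw [h1]; simp, ?_⟩
        intro hm
        rcases List.mem_cons.1 hm with he | hm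
        · exact hc he.symm
        · exact h2 hm

-- first-comma uniqueness: two comma-free prefixes before a comma must coincide
lemma pvCommaSplit_unique {lt t p rest : List Char}
    (h : lt ++ ',' :: t = p ++ ',' :: rest) (hlt : ',' ∉ lt) (hp : ',' ∉ p) :
    lt = p ∧ t = rest := by
  induction lt generalizing p with
  | nil =>
    cases p with
    | nil => simpa using h
    | cons d p' =>
      simp only [List.nil_append, List.cons_append, List.cons.injEq] at h
      exact absurd (by rw [h.1]; exact List.mem_cons_self ..) hp
  | cons c lt' ih =>
    cases p with
    | nil =>
      simp only [List.nil_append, List.cons_append, List.cons.injEq] at h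
      exact absurd (by rw [← h.1]; exact List.mem_cons_self ..) hlt
    | cons d p' =>
      simp only [List.cons_append, List.cons.injEq] at h
      obtain ⟨hcd, h'⟩ := h
      obtain ⟨h1, h2⟩ := ih h' (fun hm => hlt (List.mem_cons_of_mem _ hm))
        (fun hm => hp (List.mem_cons_of_mem _ hm))
      exact ⟨by rw [hcd, h1], h2⟩

-- startswith with (lt ++ ",") for comma-free lt, on a string whose first-comma split is (p, rest)
lemma pvStartswith_iff {cs lt p rest : List Char} (hsp : pvSplitComma cs = some (p, rest))
    (hlt : ',' ∉ lt) :
    PySem.Chars.startswith cs (lt ++ [',']) = true ↔ lt = p := by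
  obtain ⟨hcs, hp⟩ := pvSplitComma_some hsp
  rw [PySem.Chars.startswith_iff]
  constructor
  · rintro ⟨t, ht⟩
    rw [hcs] at ht
    have : lt ++ ',' :: t = p ++ ',' :: rest := by simpa using ht
    exact (pvCommaSplit_unique this hlt hp).1
  · rintro rfl
    exact ⟨rest, by simp [hcs]⟩

-- replace(old, new, 1) when old is a nonempty prefix: swap the prefix
lemma pvReplace1_prefix {s old new : List Char} (h : old <+: s) :
    pvReplace1 s old new = new ++ s.drop old.length := by
  have hinf : old <:+: s := h.isInfix
  have h0 : 0 ≤ PySem.Chars.find s old := (PySem.Chars.find_nonneg_iff _ _).2 hinf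
  obtain ⟨hpre, hmin⟩ := PySem.Chars.find_spec (s := s) (sub := old) h0
  have htn : (PySem.Chars.find s old).toNat = 0 := by
    by_contra hz
    exact hmin 0 (Nat.pos_of_ne_zero hz) (by simpa using h)
  simp [pvReplace1, htn, not_lt.2 h0]

lemma pvRepl (p rest new : List Char) :
    pvReplace1 (p ++ ',' :: rest) (p ++ [',']) (new ++ [',']) = new ++ ',' :: rest := by
  have he : p ++ ',' :: rest = (p ++ [',']) ++ rest := by simp
  rw [he, pvReplace1_prefix ⟨rest, rfl⟩]
  simp

-- unfold A's loop over the literal table into the three live startswith tests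
lemma pvLoopA_unfold (cs : List Char) :
    pvLoopA cs pvTableA =
      (if PySem.Chars.startswith cs ("DEST-PORT".toList ++ [',']) = true then
        some (pvReplace1 cs ("DEST-PORT".toList ++ [',']) ("DST-PORT".toList ++ [',']))
      else if PySem.Chars.startswith cs ("PROTOCOL".toList ++ [',']) = true then
        some (pvReplace1 cs ("PROTOCOL".toList ++ [',']) ("NETWORK".toList ++ [',']))
      else if PySem.Chars.startswith cs ("URL-REGEX".toList ++ [',']) = true then
        some (pvReplace1 cs ("URL-REGEX".toList ++ [',']) ("DOMAIN-REGEX".toList ++ [',']))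
      else none) := by
  have f1 : ("DEST-PORT".toList = ("final".toList : List Char)) = False := eq_false (by decide)
  have f2 : ("PROTOCOL".toList = ("final".toList : List Char)) = False := eq_false (by decide)
  have f3 : ("URL-REGEX".toList = ("final".toList : List Char)) = False := eq_false (by decide)
  simp only [pvTableA, pvLoopA, f1, f2, f3, if_true, if_false]

-- core equivalence on the stripped character list
lemma pvCore (cs : List Char) :
    (pvLoopA cs pvTableA).map String.ofList =
    (match pvSplitComma cs with
     | none => none
     | some (p, rest) =>
       (List.lookup p pvTableB).map (fun ct => String.ofList (ct ++ ',' :: rest))) := by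
  rw [pvLoopA_unfold]
  cases hsp : pvSplitComma cs with
  | none =>
    have hnc := pvSplitComma_none hsp
    have hsw : ∀ lt : List Char, ',' ∈ lt → PySem.Chars.startswith cs lt = false := by
      intro lt hm
      rw [Bool.eq_false_iff]
      intro h
      exact hnc (((PySem.Chars.startswith_iff _ _).1 h).subset hm)
    rw [hsw _ (by decide), hsw _ (by decide), hsw _ (by decide)]
    simp
  | some pr =>
    obtain ⟨p, rest⟩ := pr
    obtain ⟨hcs, hpnc⟩ := pvSplitComma_some hsp
    by_cases e1 : p = "DEST-PORT".toList
    · rw [if_pos ((pvStartswith_iff hsp (by decide)).2 e1.symm)]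
      subst e1
      rw [hcs, pvRepl]
      simp only [pvTableB, List.lookup, beq_self_eq_true, Option.map_some]
    · rw [if_neg (by rw [pvStartswith_iff hsp (by decide)]; exact fun h => e1 h.symm)]
      by_cases e2 : p = "PROTOCOL".toList
      · rw [if_pos ((pvStartswith_iff hsp (by decide)).2 e2.symm)]
        subst e2
        rw [hcs, pvRepl]
        simp only [pvTableB, List.lookup, beq_self_eq_true, beq_eq_false_iff_ne.mpr e1,
          Option.map_some]
      · rw [if_neg (by rw [pvStartswith_iff hsp (by decide)]; exact fun h => e2 h.symm)]
        by_cases e3 : p = "URL-REGEX".toList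
        · rw [if_pos ((pvStartswith_iff hsp (by decide)).2 e3.symm)]
          subst e3
          rw [hcs, pvRepl]
          simp only [pvTableB, List.lookup, beq_self_eq_true, beq_eq_false_iff_ne.mpr e1,
            beq_eq_false_iff_ne.mpr e2, Option.map_some]
        · rw [if_neg (by rw [pvStartswith_iff hsp (by decide)]; exact fun h => e3 h.symm)]
          simp only [pvTableB, List.lookup, beq_eq_false_iff_ne.mpr e1,
            beq_eq_false_iff_ne.mpr e2, beq_eq_false_iff_ne.mpr e3, Option.map_none]

-- ===== VERDICT (by name: the statement is the Claim_ definition above) =====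
theorem get_clash_equivalent_spec : Claim_equal_get_clash_equivalent := by
  intro rule _
  unfold Spec_get_clash_equivalent get_clash_equivalent get_clash_equivalent_alt
  by_cases h : PySem.Str.strip rule = "final"
  · simp [h]
  · simp only [h, if_false]
    exact pvCore (PySem.Str.strip rule).toList
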